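-- pv_equiv track=rewrite | github.com/cmry/markdoc | markdoc.py | md_table
-- ===== SOURCE A (Python) =====
-- MD_TABLE = '''
--
-- | {0}    | Type             | Doc             |
-- |:-------|:-----------------|:----------------|
-- '''
--
-- MD_TABLE_ROW = '| {0} | {1} | {2} | \n'
--
-- def md_table(doc, name):
--     r"""Place parameters and attributes in a table overview.
--
--     The documentation parts that are typed by 'var : type \n description'
--     can be splitted into a table. The same holds true for a list of class
--     methods. These are handled by this method. Table structures are on
--     the top of this Python file.
--
--     Parameters
--     ----------
--     doc : str
--         Flat string structure of a docstring block.
--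
--     name : str
--         Indicator for the table, can be for example Parameters or
--         Attributes.
--
--     Returns
--     -------
--     table : str
--         Markdown-type table with filled rows and formatted name.
--     """
--     var_type, line_buffer, lines = '', (), []
--     table = MD_TABLE.format(name)
--
--     # given var : type \n description, splits these up into 3 cellss
--     if not doc:
--         return ''
--
--     for row in doc:
--         if ':' in row and line_buffer:  # if we hit the next, store table
--             line_buffer += (''.join(lines), )
--             table += MD_TABLE_ROW.format(*line_buffer)
--             line_buffer = ()
--             lines = []
--         if ':' in row and not line_buffer:  # it's var : type
--             var_type = row.split(' : ')
--             for part in var_type: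
--                 line_buffer += (part, )
--         elif line_buffer:  # if no next, keep appending rows
--             lines.append(row.replace('\n', ' '))
--
--     if line_buffer:  # empty the buffer
--         line_buffer += (''.join(lines), )
--         table += MD_TABLE_ROW.format(*line_buffer)
--
--     return table
-- ===== SOURCE B (Python) =====
-- MD_TABLE = '''
--
-- | {0}    | Type             | Doc             |
-- |:-------|:-----------------|:----------------|
-- '''
--
-- MD_TABLE_ROW = '| {0} | {1} | {2} | \n'
--
--
-- def md_table(doc, name):
--     """Markdown table built in two passes: group rows, then render rows."""
--     if not doc:
--         return ''
--     # pass 1: group the rows into (header parts, description lines) records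
--     groups = []
--     for row in doc:
--         if ':' in row:
--             groups.append((row.split(' : '), []))
--         elif groups:
--             groups[-1][1].append(row.replace('\n', ' '))
--     # pass 2: render one table row per record
--     table = MD_TABLE.format(name)
--     for parts, desc in groups:
--         table += MD_TABLE_ROW.format(*parts, ''.join(desc))
--     return table
-- ===== Notes on version B (the rewrite author's own statement) =====
-- stated objective: simpler
-- what changed: Replaces A's single-pass flush-on-next-header buffer state machine with a two-pass decomposition: first group the rows into (header parts, description lines) records, then render each record as one table row.
import Mathlib
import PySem

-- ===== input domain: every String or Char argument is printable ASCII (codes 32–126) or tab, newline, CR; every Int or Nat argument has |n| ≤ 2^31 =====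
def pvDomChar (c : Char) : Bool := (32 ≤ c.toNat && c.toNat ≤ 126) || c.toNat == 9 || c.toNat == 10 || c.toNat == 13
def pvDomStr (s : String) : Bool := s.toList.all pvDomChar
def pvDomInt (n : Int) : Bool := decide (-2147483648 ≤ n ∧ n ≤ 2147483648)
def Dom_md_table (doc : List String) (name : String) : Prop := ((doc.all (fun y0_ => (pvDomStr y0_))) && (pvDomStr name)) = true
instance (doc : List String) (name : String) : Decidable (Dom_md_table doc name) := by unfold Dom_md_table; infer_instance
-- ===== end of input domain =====

-- B replaces A's single-pass flush-on-next-header buffer machine by a two-pass decomposition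
-- (group rows into (header parts, description lines) records, then render each record); simpler, not faster.


-- shared primitive wrappers (transliterations of Python expressions both sources contain)
-- row.split(' : ')  (sep is a non-empty literal, so Python never raises; the getD default is unreachable)
def pySplitColon (s : String) : List String := (PySem.Str.split? s " : ").getD []

-- MD_TABLE.format(name)
def mdHeader (name : String) : String :=
  "\n\n| " ++ name ++ "    | Type             | Doc             |\n|:-------|:-----------------|:----------------|\n"

-- MD_TABLE_ROW.format(*parts): Python uses fields {0} {1} {2} and IGNORES extra positional args;
-- on fewer than 3 parts Python raises IndexError (excluded by Pre_md_table), here getD "" stands in.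
def rowFmt (parts : List String) : String :=
  "| " ++ parts.getD 0 "" ++ " | " ++ parts.getD 1 "" ++ " | " ++ parts.getD 2 "" ++ " | \n"

-- ===== PORT A =====
-- one iteration of A's loop over `row`, state = (line_buffer, lines, table)
def aStep (st : List String × List String × String) (row : String) : List String × List String × String :=
  let st1 :=
    if PySem.Str.isIn ":" row = true ∧ st.1 ≠ [] then
      (([] : List String), ([] : List String),
        st.2.2 ++ rowFmt (st.1 ++ [PySem.Str.join "" st.2.1]))
    else st
  if PySem.Str.isIn ":" row = true ∧ st1.1 = [] then
    (pySplitColon row, st1.2.1, st1.2.2)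
  else if st1.1 ≠ [] then
    (st1.1, st1.2.1 ++ [PySem.Str.replace row "\n" " "], st1.2.2)
  else st1

def md_table (doc : List String) (name : String) : String :=
  if doc = [] then ""
  else
    let st := doc.foldl aStep ([], [], mdHeader name)
    if st.1 ≠ [] then st.2.2 ++ rowFmt (st.1 ++ [PySem.Str.join "" st.2.1]) else st.2.2

-- ===== PORT B =====
-- pass 1, one iteration: groups.append / groups[-1][1].append
def bStep (gs : List (List String × List String)) (row : String) : List (List String × List String) :=
  if PySem.Str.isIn ":" row = true then gs ++ [(pySplitColon row, [])]
  else if gs = [] then gs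
  else gs.dropLast ++ [((gs.getLastD ([], [])).1,
                        (gs.getLastD ([], [])).2 ++ [PySem.Str.replace row "\n" " "])]

-- pass 2: render one table row per record
def rowsFold (gs : List (List String × List String)) (t : String) : String :=
  gs.foldl (fun tb g => tb ++ rowFmt (g.1 ++ [PySem.Str.join "" g.2])) t

def md_table_alt (doc : List String) (name : String) : String :=
  if doc = [] then ""
  else rowsFold (doc.foldl bStep []) (mdHeader name)

-- ===== PRECONDITION & SPEC =====
-- Pre_ excludes docs containing a row with ':' but without ' : ': there Python A raises
-- IndexError (MD_TABLE_ROW.format gets fewer than 3 fields); B raises the same way.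
def Pre_md_table (doc : List String) (name : String) : Prop :=
  ∀ row ∈ doc, PySem.Str.isIn ":" row = true → PySem.Str.isIn " : " row = true
instance (doc : List String) (name : String) : Decidable (Pre_md_table doc name) := by
  unfold Pre_md_table; infer_instance

def pvWitness_md_table : List String × String := (["x : int", "the x value", "y : str"], "Parameters")

def Spec_md_table (doc : List String) (name : String) (out : String) : Prop := out = md_table_alt doc name
instance (doc : List String) (name : String) (out : String) : Decidable (Spec_md_table doc name out) := by unfold Spec_md_table; infer_instance

-- ===== CLAIM (what is proved, stated in full; the proofs are below) =====
def Claim_equal_md_table : Prop := ∀ (doc : List String) (name : String), Dom_md_table doc name → Pre_md_table doc name → Spec_md_table doc name (md_table doc name)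

-- ===== LEMMAS AND PROOFS =====

lemma splitOn_go_ne_nil (fuel : Nat) : ∀ (sep l cur : List Char) (acc : List (List Char)),
    PySem.Chars.splitOn.go sep fuel l cur acc ≠ [] := by
  induction fuel with
  | zero => intro sep l cur acc; simp [PySem.Chars.splitOn.go]
  | succ n ih =>
    intro sep l cur acc
    cases l with
    | nil => simp [PySem.Chars.splitOn.go]
    | cons c rest =>
      rw [PySem.Chars.splitOn.go]
      split
      · exact ih _ _ _ _
      · exact ih _ _ _ _

lemma pySplitColon_ne_nil (s : String) : pySplitColon s ≠ [] := by
  unfold pySplitColon PySem.Str.split?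
  rw [PySem.Chars.split?]
  simp [PySem.Chars.splitOn]
  intro h
  exact splitOn_go_ne_nil _ _ _ _ _ h

-- correspondence between A's loop state and B's group list (proof-only)
def corr (st : List String × List String × String)
    (gs : List (List String × List String)) (T0 : String) : Prop :=
  (gs = [] ∧ st = ([], [], T0)) ∨
  ∃ t h ds, h ≠ [] ∧ gs = t ++ [(h, ds)] ∧ st = (h, ds, rowsFold t T0)

lemma corr_step (row : String) (st : List String × List String × String)
    (gs : List (List String × List String)) (T0 : String)
    (hc : corr st gs T0) : corr (aStep st row) (bStep gs row) T0 := by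
  by_cases hcol : PySem.Chars.isIn [':'] row.toList = true
  · rcases hc with ⟨hg, hst⟩ | ⟨t, h, ds, hh, hg, hst⟩ <;> subst hg <;> subst hst
    · refine Or.inr ⟨[], pySplitColon row, [], pySplitColon_ne_nil row, ?_, ?_⟩ <;>
        simp [aStep, bStep, hcol, rowsFold]
    · refine Or.inr ⟨t ++ [(h, ds)], pySplitColon row, [], pySplitColon_ne_nil row, ?_, ?_⟩
      · simp [bStep, hcol]
      · simp [aStep, hcol, hh, rowsFold]
  · rcases hc with ⟨hg, hst⟩ | ⟨t, h, ds, hh, hg, hst⟩ <;> subst hg <;> subst hst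
    · exact Or.inl ⟨by simp [bStep, hcol], by simp [aStep, hcol]⟩
    · refine Or.inr ⟨t, h, ds ++ [PySem.Str.replace row "\n" " "], hh, ?_, ?_⟩
      · simp [bStep, hcol]
      · simp [aStep, hcol, hh]

lemma corr_foldl (rows : List String) : ∀ st gs T0, corr st gs T0 →
    corr (rows.foldl aStep st) (rows.foldl bStep gs) T0 := by
  induction rows with
  | nil => intro st gs T0 h; exact h
  | cons r rs ih =>
    intro st gs T0 h
    exact ih _ _ _ (corr_step r st gs T0 h)

theorem md_table_eq (doc : List String) (name : String) :
    md_table doc name = md_table_alt doc name := by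
  unfold md_table md_table_alt
  by_cases hd : doc = []
  · simp [hd]
  · simp only [hd, if_false]
    have h := corr_foldl doc ([], [], mdHeader name) [] (mdHeader name)
      (Or.inl ⟨rfl, rfl⟩)
    rcases h with ⟨hg, hst⟩ | ⟨t, hh, ds, hne, hg, hst⟩
    · rw [hg, hst]; simp [rowsFold]
    · rw [hg, hst]
      simp only [hne, ne_eq, not_false_iff, if_pos]
      simp [rowsFold]

-- ===== VERDICT (by name: the statement is the Claim_ definition above) =====
theorem md_table_spec : Claim_equal_md_table := by
  intro doc name _ _
  unfold Spec_md_table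
  exact md_table_eq doc name
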